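-- pv_equiv track=rewrite | github.com/pypi-data/pypi-mirror-404 | packages/aws-inventory-manager/aws_inventory_manager-0.31.1-py3-none-any.whl/src/generate/property_maps/dynamodb.py | process_key_schema
-- ===== SOURCE A (Python) =====
-- from typing import Any, Dict, List, Optional
--
-- def process_key_schema(raw_schema: List[Dict[str, str]]) -> tuple[Optional[str], Optional[str]]:
--     """Extract hash and range keys from key schema.
--
--     AWS format:
--     [
--         {"AttributeName": "id", "KeyType": "HASH"},
--         {"AttributeName": "sort_key", "KeyType": "RANGE"}
--     ]
--
--     Args:
--         raw_schema: List of key schema items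
--
--     Returns:
--         Tuple of (hash_key, range_key)
--     """
--     hash_key = None
--     range_key = None
--
--     if not raw_schema:
--         return hash_key, range_key
--
--     for item in raw_schema:
--         if item.get("KeyType") == "HASH":
--             hash_key = item.get("AttributeName")
--         elif item.get("KeyType") == "RANGE":
--             range_key = item.get("AttributeName")
--
--     return hash_key, range_key
-- ===== SOURCE B (Python) =====
-- from typing import Dict, List, Optional
--
-- def process_key_schema(raw_schema: List[Dict[str, str]]) -> tuple[Optional[str], Optional[str]]:
--     if not raw_schema:
--         return None, None
--     rev = raw_schema[::-1]
--     hash_key = next((it.get("AttributeName") for it in rev if it.get("KeyType") == "HASH"), None)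
--     range_key = next((it.get("AttributeName") for it in rev if it.get("KeyType") == "RANGE"), None)
--     return hash_key, range_key
-- ===== Notes on version B (the rewrite author's own statement) =====
-- stated objective: alternative
-- what changed: Replaces A's forward accumulating loop (overwrite, last wins) with a back-to-front search: scan the reversed list and return the FIRST matching HASH and RANGE entries, with early exit per key.
import Mathlib
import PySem

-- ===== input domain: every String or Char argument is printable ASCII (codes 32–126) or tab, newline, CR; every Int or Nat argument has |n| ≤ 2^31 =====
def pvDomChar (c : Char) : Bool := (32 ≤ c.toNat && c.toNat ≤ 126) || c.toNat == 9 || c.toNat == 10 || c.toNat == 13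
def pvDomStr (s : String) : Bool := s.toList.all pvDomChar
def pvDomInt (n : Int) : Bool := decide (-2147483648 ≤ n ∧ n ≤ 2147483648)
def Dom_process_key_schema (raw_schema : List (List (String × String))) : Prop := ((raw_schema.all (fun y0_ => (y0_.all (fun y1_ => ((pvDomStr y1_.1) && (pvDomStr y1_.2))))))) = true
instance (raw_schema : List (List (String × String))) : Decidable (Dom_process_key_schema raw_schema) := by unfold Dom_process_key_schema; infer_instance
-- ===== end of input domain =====

-- B replaces A's forward accumulating loop (last write wins) with a back-to-front search:
-- first match on the reversed list, one search per key (early exit); objective: alternative decomposition.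

-- item.get(k) on the Python dict item (assoc list) = first-match lookup
def pvItemGet (item : List (String × String)) (k : String) : Option String :=
  (PySem.Dict.mk item).get? k

-- ===== PORT A =====
def process_key_schema (raw_schema : List (List (String × String))) : Option String × Option String :=
  -- hash_key = None; range_key = None; if not raw_schema: return (None, None)
  if raw_schema = [] then (none, none)
  else
    -- for item in raw_schema: if item.get("KeyType") == "HASH": ... elif ... == "RANGE": ...
    raw_schema.foldl
      (fun (st : Option String × Option String) item =>
        if pvItemGet item "KeyType" = some "HASH" then (pvItemGet item "AttributeName", st.2)
        else if pvItemGet item "KeyType" = some "RANGE" then (st.1, pvItemGet item "AttributeName")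
        else st)
      (none, none)

-- ===== PORT B =====
-- next((it.get("AttributeName") for it in rev if it.get("KeyType") == k), None)
def pvFindKey (rev : List (List (String × String))) (k : String) : Option String :=
  match rev.find? (fun it => pvItemGet it "KeyType" == some k) with
  | some it => pvItemGet it "AttributeName"
  | none => none

def process_key_schema_alt (raw_schema : List (List (String × String))) : Option String × Option String :=
  if raw_schema = [] then (none, none)
  else
    let rev := raw_schema.reverse   -- raw_schema[::-1]
    (pvFindKey rev "HASH", pvFindKey rev "RANGE")

-- ===== PRECONDITION & SPEC =====
def Spec_process_key_schema (raw_schema : List (List (String × String))) (out : Option String × Option String) : Prop := out = process_key_schema_alt raw_schema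
instance (raw_schema : List (List (String × String))) (out : Option String × Option String) : Decidable (Spec_process_key_schema raw_schema out) := by unfold Spec_process_key_schema; infer_instance

-- ===== CLAIM (what is proved, stated in full; the proofs are below) =====
def Claim_equal_process_key_schema : Prop := ∀ (raw_schema : List (List (String × String))), Dom_process_key_schema raw_schema → Spec_process_key_schema raw_schema (process_key_schema raw_schema)

-- ===== LEMMAS AND PROOFS =====

-- ===== VERDICT (by name: the statement is the Claim_ definition above) =====
-- A's fold from state st equals: first match in the reversed suffix, else the state's component.
theorem pks_fold_eq (l : List (List (String × String))) (st : Option String × Option String) :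
    l.foldl
      (fun (st : Option String × Option String) item =>
        if pvItemGet item "KeyType" = some "HASH" then (pvItemGet item "AttributeName", st.2)
        else if pvItemGet item "KeyType" = some "RANGE" then (st.1, pvItemGet item "AttributeName")
        else st) st
    = ((l.reverse.find? (fun it => pvItemGet it "KeyType" == some "HASH")).elim st.1
         (fun it => pvItemGet it "AttributeName"),
       (l.reverse.find? (fun it => pvItemGet it "KeyType" == some "RANGE")).elim st.2
         (fun it => pvItemGet it "AttributeName")) := by
  induction l generalizing st with
  | nil => simp
  | cons item rest ih =>
      simp only [List.foldl_cons, ih, List.reverse_cons, List.find?_append,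
                 List.find?_cons, List.find?_nil]
      by_cases hH : pvItemGet item "KeyType" = some "HASH" <;>
      by_cases hR : pvItemGet item "KeyType" = some "RANGE" <;>
      cases h1 : rest.reverse.find? (fun it => pvItemGet it "KeyType" == some "HASH") <;>
      cases h2 : rest.reverse.find? (fun it => pvItemGet it "KeyType" == some "RANGE") <;>
      simp_all [Option.or, beq_iff_eq] <;>
      simp [beq_eq_false_iff_ne.mpr hH, beq_eq_false_iff_ne.mpr hR]

theorem pks_fold_eq' (l : List (List (String × String))) :
    l.foldl
      (fun (st : Option String × Option String) item =>
        if pvItemGet item "KeyType" = some "HASH" then (pvItemGet item "AttributeName", st.2)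
        else if pvItemGet item "KeyType" = some "RANGE" then (st.1, pvItemGet item "AttributeName")
        else st) (none, none)
    = (pvFindKey l.reverse "HASH", pvFindKey l.reverse "RANGE") := by
  rw [pks_fold_eq]
  unfold pvFindKey
  cases hH : List.find? (fun it => pvItemGet it "KeyType" == some "HASH") l.reverse <;>
  cases hR : List.find? (fun it => pvItemGet it "KeyType" == some "RANGE") l.reverse <;>
  simp [hH, hR]

theorem process_key_schema_spec : Claim_equal_process_key_schema := by
  intro raw _
  unfold Spec_process_key_schema process_key_schema process_key_schema_alt
  by_cases h : raw = []
  · simp [h]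
  · simp only [h, ite_false]
    exact pks_fold_eq' raw
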